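-- pv_equiv track=rewrite | github.com/kybcod/codingtestpractice | 프로그래머스/0/120956. 옹알이 （1）/옹알이 （1）.py | solution
-- ===== SOURCE A (Python) =====
-- def solution(babbling):
--     # 조카의 발음을 나타내는 딕셔너리
--     pronunciation = {
--         "aya": 1,
--         "ye": 1,
--         "woo": 1,
--         "ma": 1
--     }
--
--     # 발음 가능한 단어의 개수를 저장할 변수
--     word_count = 0
--
--     # babbling 배열을 순회하며 발음 가능한 단어를 찾음
--     for word in babbling:
--         i = 0
--         while i < len(word):
--             found = False
--             for pron in pronunciation:
--                 if word.startswith(pron, i):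
--                     found = True
--                     i += len(pron)
--                     break
--             if not found:
--                 break
--
--         # 모든 발음이 가능한 경우 단어 개수를 증가
--         if i == len(word):
--             word_count += 1
--
--     return word_count
-- ===== SOURCE B (Python) =====
-- def _step(s, c):
--     # DFA over proper prefixes of the tokens: 0 = start/accept,
--     # 1 = "a", 3 = "ay", 4 = "y", 2 = "w", 6 = "wo", 5 = "m", -1 = dead
--     if s == 0:
--         if c == 'a': return 1
--         if c == 'y': return 4
--         if c == 'w': return 2
--         if c == 'm': return 5
--     elif s == 1:
--         if c == 'y': return 3
--     elif s == 2:
--         if c == 'o': return 6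
--     elif s == 3 or s == 5:
--         if c == 'a': return 0
--     elif s == 4:
--         if c == 'e': return 0
--     elif s == 6:
--         if c == 'o': return 0
--     return -1
--
-- def solution(babbling):
--     count = 0
--     for word in babbling:
--         state = 0
--         for ch in word:
--             state = _step(state, ch)
--         if state == 0:
--             count += 1
--     return count
-- ===== Notes on version B (the rewrite author's own statement) =====
-- stated objective: alternative
-- what changed: Replaces the greedy position-advancing scan with repeated 4-way startswith tests by a single character-at-a-time pass through each word driving a 7-state DFA for (aya|ye|woo|ma)*.
import Mathlib
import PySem

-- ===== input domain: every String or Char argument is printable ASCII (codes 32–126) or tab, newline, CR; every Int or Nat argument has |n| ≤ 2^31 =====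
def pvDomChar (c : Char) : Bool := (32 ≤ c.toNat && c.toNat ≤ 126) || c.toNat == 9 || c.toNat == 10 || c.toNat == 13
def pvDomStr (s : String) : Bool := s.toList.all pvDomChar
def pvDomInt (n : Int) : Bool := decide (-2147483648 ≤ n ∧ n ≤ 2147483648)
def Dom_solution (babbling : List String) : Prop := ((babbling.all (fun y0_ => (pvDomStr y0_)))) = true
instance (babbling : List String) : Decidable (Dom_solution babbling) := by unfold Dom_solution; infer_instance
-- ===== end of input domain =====

-- B replaces A's greedy startswith scan by a per-character DFA pass; same cost, different algorithm.

-- ===== PORT A =====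
-- the while-loop over index i; word.startswith(pron, i) = pron is a prefix of word[i:];
-- the inner `for pron in pronunciation` with `found`/`break` is the ordered if-chain below
def solLoop (cs : List Char) (i : Nat) : Nat :=
  if _h : i < cs.length then
    if PySem.Chars.startswith (cs.drop i) ['a','y','a'] then solLoop cs (i+3)
    else if PySem.Chars.startswith (cs.drop i) ['y','e'] then solLoop cs (i+2)
    else if PySem.Chars.startswith (cs.drop i) ['w','o','o'] then solLoop cs (i+3)
    else if PySem.Chars.startswith (cs.drop i) ['m','a'] then solLoop cs (i+2)
    else i
  else i
termination_by cs.length - i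
decreasing_by all_goals omega

def solution (babbling : List String) : Int :=
  babbling.foldl (fun word_count word =>
    if solLoop word.toList 0 = word.toList.length then word_count + 1 else word_count) 0

-- ===== PORT B =====
-- _step from Source B: the DFA transition table as the same if-chain
def dfaStep (s : Int) (c : Char) : Int :=
  if s = 0 then
    (if c = 'a' then 1 else if c = 'y' then 4 else if c = 'w' then 2 else if c = 'm' then 5 else -1)
  else if s = 1 then (if c = 'y' then 3 else -1)
  else if s = 2 then (if c = 'o' then 6 else -1)
  else if s = 3 ∨ s = 5 then (if c = 'a' then 0 else -1)
  else if s = 4 then (if c = 'e' then 0 else -1)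
  else if s = 6 then (if c = 'o' then 0 else -1)
  else -1

def solution_alt (babbling : List String) : Int :=
  babbling.foldl (fun count word =>
    count + (if word.toList.foldl dfaStep 0 = 0 then 1 else 0)) 0

-- ===== PRECONDITION & SPEC =====
def Spec_solution (babbling : List String) (out : Int) : Prop := out = solution_alt babbling
instance (babbling : List String) (out : Int) : Decidable (Spec_solution babbling out) := by unfold Spec_solution; infer_instance

-- ===== CLAIM (what is proved, stated in full; the proofs are below) =====
def Claim_equal_solution : Prop := ∀ (babbling : List String), Dom_solution babbling → Spec_solution babbling (solution babbling)

-- ===== LEMMAS AND PROOFS =====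

-- suffix view of A's while loop: number of characters it consumes from a suffix
def gg (cs : List Char) : Nat :=
  if PySem.Chars.startswith cs ['a','y','a'] then 3 + gg (cs.drop 3)
  else if PySem.Chars.startswith cs ['y','e'] then 2 + gg (cs.drop 2)
  else if PySem.Chars.startswith cs ['w','o','o'] then 3 + gg (cs.drop 3)
  else if PySem.Chars.startswith cs ['m','a'] then 2 + gg (cs.drop 2)
  else 0
termination_by cs.length
decreasing_by
  all_goals
    rename_i h
    have := ((PySem.Chars.startswith_iff _ _).mp h).length_le
    simp at this ⊢
    omega

lemma solLoop_eq_gg (cs : List Char) (i : Nat) : solLoop cs i = i + gg (cs.drop i) := by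
  induction i using solLoop.induct (cs := cs) with
  | case1 i h h1 ih =>
      rw [solLoop, gg]
      simp [h, h1, List.drop_drop, ih]
      try omega
  | case2 i h h1 h2 ih =>
      rw [solLoop, gg]
      simp [h, h1, h2, List.drop_drop, ih]
      try omega
  | case3 i h h1 h2 h3 ih =>
      rw [solLoop, gg]
      simp [h, h1, h2, h3, List.drop_drop, ih]
      try omega
  | case4 i h h1 h2 h3 h4 ih =>
      rw [solLoop, gg]
      simp [h, h1, h2, h3, h4, List.drop_drop, ih]
      try omega
  | case5 i h h1 h2 h3 h4 =>
      rw [solLoop, gg]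
      simp [h, h1, h2, h3, h4]
  | case6 i h =>
      have hle : cs.length <= i := by omega
      rw [solLoop]
      rw [List.drop_eq_nil_of_le hle]
      simp [gg, h, PySem.Chars.startswith]

lemma dead_absorb (cs : List Char) : cs.foldl dfaStep (-1) = -1 := by
  induction cs with
  | nil => rfl
  | cons c t ih => simp [List.foldl, dfaStep]; exact ih

lemma step_aya (t : List Char) : ('a'::'y'::'a'::t).foldl dfaStep 0 = t.foldl dfaStep 0 := by
  have h1 : dfaStep 0 'a' = 1 := by decide
  have h2 : dfaStep 1 'y' = 3 := by decide
  have h3 : dfaStep 3 'a' = 0 := by decide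
  simp only [List.foldl_cons, h1, h2, h3]

lemma step_ye (t : List Char) : ('y'::'e'::t).foldl dfaStep 0 = t.foldl dfaStep 0 := by
  have h1 : dfaStep 0 'y' = 4 := by decide
  have h2 : dfaStep 4 'e' = 0 := by decide
  simp only [List.foldl_cons, h1, h2]

lemma step_woo (t : List Char) : ('w'::'o'::'o'::t).foldl dfaStep 0 = t.foldl dfaStep 0 := by
  have h1 : dfaStep 0 'w' = 2 := by decide
  have h2 : dfaStep 2 'o' = 6 := by decide
  have h3 : dfaStep 6 'o' = 0 := by decide
  simp only [List.foldl_cons, h1, h2, h3]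

lemma step_ma (t : List Char) : ('m'::'a'::t).foldl dfaStep 0 = t.foldl dfaStep 0 := by
  have h1 : dfaStep 0 'm' = 5 := by decide
  have h2 : dfaStep 5 'a' = 0 := by decide
  simp only [List.foldl_cons, h1, h2]

lemma pfx {cs : List Char} (p t : List Char) (h : cs = p ++ t) : PySem.Chars.startswith cs p = true :=
  (PySem.Chars.startswith_iff _ _).mpr ⟨t, h.symm⟩

lemma main_iff (cs : List Char) : (gg cs = cs.length) ↔ (cs.foldl dfaStep 0 = 0) := by
  induction cs using gg.induct with
  | case1 cs h ih =>
      obtain ⟨t, rfl⟩ := (PySem.Chars.startswith_iff _ _).mp h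
      have hd : List.drop 3 (['a','y','a'] ++ t) = t := rfl
      rw [gg]
      simp only [h, if_pos, hd] at ih ⊢
      rw [show (['a','y','a'] ++ t) = 'a'::'y'::'a'::t from rfl, step_aya]
      simp only [List.length_cons]
      constructor
      · intro hg; exact ih.mp (by omega)
      · intro hf; have := ih.mpr hf; omega
  | case2 cs h h2 ih =>
      obtain ⟨t, rfl⟩ := (PySem.Chars.startswith_iff _ _).mp h2
      have hd : List.drop 2 (['y','e'] ++ t) = t := rfl
      rw [gg]
      simp only [h, h2, if_pos, if_neg, not_false_iff, Bool.false_eq_true, hd] at ih ⊢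
      rw [show (['y','e'] ++ t) = 'y'::'e'::t from rfl, step_ye]
      simp only [List.length_cons]
      constructor
      · intro hg; exact ih.mp (by omega)
      · intro hf; have := ih.mpr hf; omega
  | case3 cs h h2 h3 ih =>
      obtain ⟨t, rfl⟩ := (PySem.Chars.startswith_iff _ _).mp h3
      have hd : List.drop 3 (['w','o','o'] ++ t) = t := rfl
      rw [gg]
      simp only [h, h2, h3, if_pos, if_neg, not_false_iff, Bool.false_eq_true, hd] at ih ⊢
      rw [show (['w','o','o'] ++ t) = 'w'::'o'::'o'::t from rfl, step_woo]
      simp only [List.length_cons]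
      constructor
      · intro hg; exact ih.mp (by omega)
      · intro hf; have := ih.mpr hf; omega
  | case4 cs h h2 h3 h4 ih =>
      obtain ⟨t, rfl⟩ := (PySem.Chars.startswith_iff _ _).mp h4
      have hd : List.drop 2 (['m','a'] ++ t) = t := rfl
      rw [gg]
      simp only [h, h2, h3, h4, if_pos, if_neg, not_false_iff, Bool.false_eq_true, hd] at ih ⊢
      rw [show (['m','a'] ++ t) = 'm'::'a'::t from rfl, step_ma]
      simp only [List.length_cons]
      constructor
      · intro hg; exact ih.mp (by omega)
      · intro hf; have := ih.mpr hf; omega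
  | case5 cs h h2 h3 h4 =>
      have hg : gg cs = 0 := by rw [gg]; simp [h, h2, h3, h4]
      rcases cs with _ | ⟨c1, t1⟩
      · simp [hg]
      rw [hg]
      simp only [List.length_cons, List.foldl_cons]
      constructor
      · intro hlen; omega
      intro hf; exfalso
      by_cases ha : c1 = 'a'
      · subst ha
        have : dfaStep 0 'a' = 1 := by decide
        rw [this] at hf
        rcases t1 with _ | ⟨c2, t2⟩
        · norm_num [List.foldl] at hf
        by_cases hy : c2 = 'y'
        · subst hy
          have : dfaStep 1 'y' = 3 := by decide
          rw [List.foldl_cons, this] at hf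
          rcases t2 with _ | ⟨c3, t3⟩
          · norm_num [List.foldl] at hf
          by_cases ha3 : c3 = 'a'
          · subst ha3; exact absurd (pfx ['a','y','a'] t3 rfl) (by simp [h])
          · have : dfaStep 3 c3 = -1 := by norm_num [dfaStep, ha3]
            rw [List.foldl_cons, this, dead_absorb t3] at hf; norm_num at hf
        · have : dfaStep 1 c2 = -1 := by norm_num [dfaStep, hy]
          rw [List.foldl_cons, this, dead_absorb t2] at hf; norm_num at hf
      by_cases hyy : c1 = 'y'
      · subst hyy
        have : dfaStep 0 'y' = 4 := by decide
        rw [this] at hf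
        rcases t1 with _ | ⟨c2, t2⟩
        · norm_num [List.foldl] at hf
        by_cases he : c2 = 'e'
        · subst he; exact absurd (pfx ['y','e'] t2 rfl) (by simp [h2])
        · have : dfaStep 4 c2 = -1 := by norm_num [dfaStep, he]
          rw [List.foldl_cons, this, dead_absorb t2] at hf; norm_num at hf
      by_cases hw : c1 = 'w'
      · subst hw
        have : dfaStep 0 'w' = 2 := by decide
        rw [this] at hf
        rcases t1 with _ | ⟨c2, t2⟩
        · norm_num [List.foldl] at hf
        by_cases ho : c2 = 'o'
        · subst ho
          have : dfaStep 2 'o' = 6 := by decide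
          rw [List.foldl_cons, this] at hf
          rcases t2 with _ | ⟨c3, t3⟩
          · norm_num [List.foldl] at hf
          by_cases ho3 : c3 = 'o'
          · subst ho3; exact absurd (pfx ['w','o','o'] t3 rfl) (by simp [h3])
          · have : dfaStep 6 c3 = -1 := by norm_num [dfaStep, ho3]
            rw [List.foldl_cons, this, dead_absorb t3] at hf; norm_num at hf
        · have : dfaStep 2 c2 = -1 := by norm_num [dfaStep, ho]
          rw [List.foldl_cons, this, dead_absorb t2] at hf; norm_num at hf
      by_cases hm : c1 = 'm'
      · subst hm
        have : dfaStep 0 'm' = 5 := by decide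
        rw [this] at hf
        rcases t1 with _ | ⟨c2, t2⟩
        · norm_num [List.foldl] at hf
        by_cases ha2 : c2 = 'a'
        · subst ha2; exact absurd (pfx ['m','a'] t2 rfl) (by simp [h4])
        · have : dfaStep 5 c2 = -1 := by norm_num [dfaStep, ha2]
          rw [List.foldl_cons, this, dead_absorb t2] at hf; norm_num at hf
      · have : dfaStep 0 c1 = -1 := by norm_num [dfaStep, ha, hyy, hw, hm]
        rw [this, dead_absorb t1] at hf; norm_num at hf

-- ===== VERDICT (by name: the statement is the Claim_ definition above) =====
theorem solution_spec : Claim_equal_solution := by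
  intro babbling hdom
  unfold Spec_solution solution solution_alt
  induction babbling using List.reverseRecOn with
  | nil => rfl
  | append_singleton t w ih =>
      have hdt : Dom_solution t := by
        simp only [Dom_solution, List.all_append, Bool.and_eq_true] at hdom
        exact hdom.1
      simp only [List.foldl_append, List.foldl_cons, List.foldl_nil, ih hdt]
      have h := main_iff w.toList
      have h0 : solLoop w.toList 0 = gg w.toList := by
        simpa using solLoop_eq_gg w.toList 0
      rw [h0]
      split_ifs with h1 h2 h2
      · rfl
      · exact absurd (h.mp h1) h2
      · exact absurd (h.mpr h2) h1
      · simp
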